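-- pv_equiv track=rewrite | github.com/marcketa/counting_rationals | CountingRationalsWithStern-BrocotAndCalkin-WilfTrees.py | stern_levels
-- ===== SOURCE A (Python) =====
-- from typing import Any, List, Union, Optional, Tuple, Callable
--
-- def stern_levels(m: int, a: int = 0, b: int = 1) -> Tuple[List[List[int]], List[int]]:
--     """ This function build the first m levels of the numerators of the Stern-Brocot binary tree
--         and the list of the first 2**m-1 terms of the Stern sequence
--
--     Args:
--         m: (int) the desired number of levels for the Stern-Brocot binary tree
--         a: (int) first initial value
--         b: (int) second initial value
--     Returns: a tuple t = (levels, l)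
--         t[0]: levels, a m terms list where levels[k] is a list of 2**k integers,
--               a representation of the tree of the numerators of kth level in the Stern-Brocot tree.
--         t[1]: list of the first 2**m-1 terms of the Stern sequence
--     """
--     l = [a,b]
--     levels = []
--     for k in range(1,m+1):
--         l_k = [l[0]]
--         level_k = []
--         for i in range(len(l)-1):
--             si = l[i]+l[i+1]
--             level_k.append(si)
--             l_k.append(si)
--             l_k.append(l[i+1])
--         levels.append(level_k)
--         l = l_k[:]
--     return levels,l[1:-1]
-- ===== SOURCE B (Python) =====
-- def stern_levels(m, a=0, b=1):
--     # Build only the final full row by m rounds of mediant-interleaving.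
--     row = [a, b]
--     for _ in range(m):
--         row = [v for x, y in zip(row, row[1:]) for v in (x, x + y)] + row[-1:]
--     # Level-k mediants occupy indices that are odd multiples of 2**(m-k-1)
--     # in the final row, so each level is a strided slice of it.
--     levels = [row[2 ** (m - k - 1) :: 2 ** (m - k)] for k in range(m)]
--     return levels, row[1:-1]
-- ===== Notes on version B (the rewrite author's own statement) =====
-- stated objective: alternative
-- what changed: B builds only the final mediant-interleaved row (no per-level bookkeeping) and then extracts each tree level in a separate pass as the strided slice row[2**(m-k-1)::2**(m-k)] of that row, while the Stern sequence is just row[1:-1].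
import Mathlib
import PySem

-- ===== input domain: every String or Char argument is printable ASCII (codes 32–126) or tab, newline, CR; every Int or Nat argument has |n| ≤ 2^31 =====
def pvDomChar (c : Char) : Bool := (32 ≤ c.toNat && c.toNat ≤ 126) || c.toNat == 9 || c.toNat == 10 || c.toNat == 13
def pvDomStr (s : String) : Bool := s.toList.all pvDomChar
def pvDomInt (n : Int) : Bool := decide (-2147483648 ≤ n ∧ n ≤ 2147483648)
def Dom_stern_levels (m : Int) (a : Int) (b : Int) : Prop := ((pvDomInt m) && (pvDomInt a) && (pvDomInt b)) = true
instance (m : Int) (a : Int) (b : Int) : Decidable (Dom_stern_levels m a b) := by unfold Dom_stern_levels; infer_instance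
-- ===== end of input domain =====

-- B builds only the final row and extracts the levels afterwards by strided slicing,
-- instead of A's single pass maintaining per-level lists; objective: alternative decomposition.

-- ===== PORT A =====
-- inner loop 'for i in range(len(l)-1)': structural recursion over the same adjacent
-- pairs, producing (level_k, l_k without its leading l[0]) with the same values in the
-- same order as the Python appends
def aInner : List Int → List Int × List Int
  | x :: y :: rest =>
      let si := x + y
      let r := aInner (y :: rest)
      (si :: r.1, si :: y :: r.2)
  | _ => ([], [])

def stern_levels (m : Int) (a : Int) (b : Int) : List (List Int) × List Int :=
  -- l = [a,b]; levels = []; for k in range(1, m+1): …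
  let st := (PySem.List.pyRange 1 (m + 1) 1).foldl
    (fun st _k =>
      -- l_k = [l[0]] : l is nonempty on every reachable state, so take 1 = [l[0]] exactly
      (st.1 ++ [(aInner st.2).1], st.2.take 1 ++ (aInner st.2).2))
    ([], [a, b])
  (st.1, PySem.List.slice st.2 (some 1) (some (-1)))

-- ===== PORT B =====
-- one interleaving round: [v for x, y in zip(row, row[1:]) for v in (x, x+y)] + row[-1:]
def bStep (row : List Int) : List Int :=
  (row.zip (PySem.List.slice row (some 1) none)).flatMap (fun p => [p.1, p.1 + p.2])
    ++ PySem.List.slice row (some (-1)) none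

-- hand port of the extended slice row[s::t]; exact for 0 ≤ s and 1 ≤ t, the only
-- arguments B passes (s, t are powers of two)
def everyNth (t : Nat) : List Int → List Int
  | [] => []
  | x :: xs => x :: everyNth t (xs.drop t)
  termination_by l => l.length
  decreasing_by simp

def bStride (row : List Int) (s t : Int) : List Int :=
  everyNth (t - 1).toNat (row.drop s.toNat)

def stern_levels_alt (m : Int) (a : Int) (b : Int) : List (List Int) × List Int :=
  let row := (PySem.List.pyRange 0 m 1).foldl (fun r _ => bStep r) [a, b]
  -- 2**(m-k-1) and 2**(m-k): exponents are ≥ 0 for every k in range(m), so .toNat is exact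
  let levels := (PySem.List.pyRange 0 m 1).map (fun k =>
    bStride row ((2 : Int) ^ (m - k - 1).toNat) ((2 : Int) ^ (m - k).toNat))
  (levels, PySem.List.slice row (some 1) (some (-1)))

-- ===== PRECONDITION & SPEC =====
def Spec_stern_levels (m : Int) (a : Int) (b : Int) (out : List (List Int) × List Int) : Prop := out = stern_levels_alt m a b
instance (m : Int) (a : Int) (b : Int) (out : List (List Int) × List Int) : Decidable (Spec_stern_levels m a b out) := by unfold Spec_stern_levels; infer_instance

-- ===== CLAIM (what is proved, stated in full; the proofs are below) =====
def Claim_equal_stern_levels : Prop := ∀ (m : Int) (a : Int) (b : Int), Dom_stern_levels m a b → Spec_stern_levels m a b (stern_levels m a b)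

-- ===== LEMMAS AND PROOFS =====

-- the list of mediants of adjacent entries (A's level_k)
def med : List Int → List Int
  | x :: y :: r => (x + y) :: med (y :: r)
  | _ => []

theorem aInner_fst : ∀ l, (aInner l).1 = med l
  | [] => rfl
  | [_] => rfl
  | x :: y :: r => by simp [aInner, med, aInner_fst (y :: r)]

theorem bStep_nil : bStep [] = [] := by rfl

theorem everyNth_nil (t : Nat) : everyNth t [] = [] := by rw [everyNth]

theorem everyNth_cons (t : Nat) (x : Int) (xs : List Int) :
    everyNth t (x :: xs) = x :: everyNth t (xs.drop t) := by rw [everyNth]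

theorem bStep_single (x : Int) : bStep [x] = [x] := by
  simp [bStep, PySem.List.slice_from_one, PySem.List.slice_from_neg_one]

theorem bStep_cons2 (x y : Int) (r : List Int) :
    bStep (x :: y :: r) = x :: (x + y) :: bStep (y :: r) := by
  simp [bStep, PySem.List.slice_from_one, PySem.List.slice_from_neg_one, List.zip]

theorem take_one_append_aInner : ∀ l : List Int, l.take 1 ++ (aInner l).2 = bStep l
  | [] => by simp [aInner, bStep_nil]
  | [x] => by simp [aInner, bStep_single]
  | x :: y :: r => by
      have ih := take_one_append_aInner (y :: r)
      simp [aInner, bStep_cons2] at *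
      simpa using ih

theorem drop_bStep : ∀ (s : Nat) (l : List Int), (bStep l).drop (2 * s) = bStep (l.drop s)
  | 0, l => by simp
  | s + 1, [] => by simp [bStep_nil]
  | s + 1, [x] => by
      simp [bStep_single, bStep_nil, List.drop_eq_nil_iff]; omega
  | s + 1, x :: y :: r => by
      have ih := drop_bStep s (y :: r)
      have h2 : 2 * (s + 1) = (2 * s) + 1 + 1 := by omega
      rw [bStep_cons2, h2, List.drop_succ_cons, List.drop_succ_cons, ih, List.drop_succ_cons]

theorem everyNth_bStep_aux : ∀ (n : Nat) (l : List Int) (k : Nat), l.length ≤ n →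
    everyNth (2 * k + 1) (bStep l) = everyNth k l
  | _, [], _, _ => by simp [bStep_nil, everyNth_nil]
  | _, [x], _, _ => by simp [bStep_single, everyNth_cons, everyNth_nil]
  | 0, _ :: _ :: _, _, h => by simp at h
  | n + 1, x :: y :: r, k, h => by
      have hlen : ((y :: r).drop k).length ≤ n := by simp at h ⊢; omega
      have ih := everyNth_bStep_aux n ((y :: r).drop k) k hlen
      rw [bStep_cons2, everyNth_cons, everyNth_cons, List.drop_succ_cons, drop_bStep, ih]

theorem everyNth_bStep (l : List Int) (k : Nat) :
    everyNth (2 * k + 1) (bStep l) = everyNth k l :=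
  everyNth_bStep_aux l.length l k le_rfl

theorem med_bStep_aux : ∀ (n : Nat) (l : List Int), l.length ≤ n →
    everyNth 1 ((bStep l).drop 1) = med l
  | _, [], _ => by simp [bStep_nil, everyNth_nil, med]
  | _, [x], _ => by simp [bStep_single, everyNth_nil, med]
  | 0, _ :: _ :: _, h => by simp at h
  | n + 1, x :: y :: r, h => by
      have hlen : (y :: r).length ≤ n := by simp at h ⊢; omega
      have ih := med_bStep_aux n (y :: r) hlen
      rw [bStep_cons2, List.drop_succ_cons, List.drop_zero, everyNth_cons, ih]
      rfl

theorem med_slice : ∀ (n : Nat) (l : List Int),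
    everyNth (2 ^ (n + 1) - 1) ((bStep^[n + 1] l).drop (2 ^ n)) = med l
  | 0, l => by simpa using med_bStep_aux l.length l le_rfl
  | n + 1, l => by
      have h1 : bStep^[n + 1 + 1] l = bStep (bStep^[n + 1] l) := Function.iterate_succ_apply' _ _ _
      have h2 : 2 ^ (n + 1) = 2 * 2 ^ n := by ring
      have h3 : 2 ^ (n + 1 + 1) - 1 = 2 * (2 ^ (n + 1) - 1) + 1 := by
        have : 1 ≤ 2 ^ (n + 1) := Nat.one_le_two_pow
        omega
      rw [h1, h2, drop_bStep, h3, everyNth_bStep]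
      exact med_slice (n + 1 - 1) l

-- fold with a body that ignores the element is an iterate
theorem foldl_const {α β : Type} (f : β → β) : ∀ (L : List α) (st : β),
    L.foldl (fun s _ => f s) st = f^[L.length] st
  | [], _ => rfl
  | _ :: L, st => by
      simp [List.foldl_cons, foldl_const f L (f st), Function.iterate_succ_apply]

-- A's loop body, rewritten through the two characterizations above
theorem gbody_eq (st : List (List Int) × List Int) :
    (st.1 ++ [(aInner st.2).1], st.2.take 1 ++ (aInner st.2).2)
      = (st.1 ++ [med st.2], bStep st.2) := by
  rw [aInner_fst, take_one_append_aInner]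

theorem g_iterate : ∀ (n : Nat) (ls : List (List Int)) (l : List Int),
    (fun st : List (List Int) × List Int => (st.1 ++ [med st.2], bStep st.2))^[n] (ls, l)
      = (ls ++ (List.range n).map (fun j => med (bStep^[j] l)), bStep^[n] l)
  | 0, ls, l => by simp
  | n + 1, ls, l => by
      rw [Function.iterate_succ_apply', g_iterate n ls l]
      simp [List.range_succ, Function.iterate_succ_apply']

-- ===== VERDICT (by name: the statement is the Claim_ definition above) =====
theorem levels_entry (N j : Nat) (l : List Int) (hj : j < N) (m : Int) (hm : m = (N : Int)) :
    bStride (bStep^[N] l) ((2 : Int) ^ (m - j - 1).toNat) ((2 : Int) ^ (m - j).toNat)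
      = med (bStep^[j] l) := by
  have hp1 : (m - j - 1).toNat = N - j - 1 := by omega
  have hp2 : (m - j).toNat = (N - j - 1) + 1 := by omega
  set p := N - j - 1 with hp
  have c1 : ((2 : Int) ^ p).toNat = 2 ^ p := by
    have : (2 : Int) ^ p = ((2 ^ p : Nat) : Int) := by push_cast; ring
    rw [this, Int.toNat_natCast]
  have c2 : ((2 : Int) ^ (p + 1) - 1).toNat = 2 ^ (p + 1) - 1 := by
    have h1 : (2 : Int) ^ (p + 1) = ((2 ^ (p + 1) : Nat) : Int) := by push_cast; ring
    have h2 : 1 ≤ 2 ^ (p + 1) := Nat.one_le_two_pow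
    omega
  have hN : N = (p + 1) + j := by omega
  rw [hp1, hp2]
  unfold bStride
  rw [c1, c2, hN, Function.iterate_add_apply]
  exact med_slice p (bStep^[j] l)

theorem stern_levels_spec : Claim_equal_stern_levels := by
  intro m a b _
  show stern_levels m a b = stern_levels_alt m a b
  have hbody : (fun (st : List (List Int) × List Int) (_k : Int) =>
      (st.1 ++ [(aInner st.2).1], st.2.take 1 ++ (aInner st.2).2))
      = fun (st : List (List Int) × List Int) (_k : Int) => (st.1 ++ [med st.2], bStep st.2) := by
    funext st _k; exact gbody_eq st
  have harith : m + 1 - 1 = m := by ring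
  have harith2 : m - 0 = m := by ring
  simp only [stern_levels, stern_levels_alt, hbody,
    foldl_const (fun st : List (List Int) × List Int => (st.1 ++ [med st.2], bStep st.2)),
    foldl_const bStep, g_iterate, List.nil_append, List.length_map, List.length_range,
    harith, harith2, PySem.List.pyRange_one, List.map_map]
  refine Prod.ext ?_ rfl
  show (List.range m.toNat).map (fun j => med (bStep^[j] [a, b]))
      = (List.range m.toNat).map _
  apply List.map_congr_left
  intro j hj
  rw [List.mem_range] at hj
  have hm : m = (m.toNat : Int) := by omega
  have := levels_entry m.toNat j [a, b] hj m hm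
  simp only [Function.comp_apply, zero_add]
  exact this.symm
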